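-- pv_equiv track=rewrite | github.com/philangist/Threes | matrix.py | pad_if_neccessary
-- ===== SOURCE A (Python) =====
-- PLACEHOLDER = None
--
-- EMPTY = 0
--
-- def pad_if_neccessary(values, original):
--     number_seen = False
--
--     cleaned_values = []
--     padding = []
--
--     for element in values:
--         if element == PLACEHOLDER:
--             if not number_seen:
--                 padding.append(EMPTY)
--         else:
--             number_seen = True
--
--         cleaned_values.append(element or EMPTY)
--
--     cleaned_values += padding
--
--     if len(cleaned_values) < len(original):
--         cleaned_values += [EMPTY] * (len(original) - len(cleaned_values))
--
--     return cleaned_values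
-- ===== SOURCE B (Python) =====
-- PLACEHOLDER = None
--
-- EMPTY = 0
--
-- def pad_if_neccessary(values, original):
--     # Positional formulation: the output length is max(len(values) + lead, len(original))
--     # where lead is the index of the first non-placeholder; each output slot is filled
--     # directly by index, with no accumulator lists and no appending.
--     lead = next((i for i, v in enumerate(values) if v != PLACEHOLDER), len(values))
--     total = max(len(values) + lead, len(original))
--     return [(values[i] or EMPTY) if i < len(values) else EMPTY for i in range(total)]
-- ===== Notes on version B (the rewrite author's own statement) =====
-- stated objective: alternative
-- what changed: Replaced A's fused accumulator loop (number_seen flag, cleaned list, padding list, then concatenation and a conditional extend) by an arithmetical/positional formulation: the output length is computed in closed form as max(len(values)+lead, len(original)) and the result is generated slot-by-slot with one index comprehension, with no list accumulation or appending.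
import Mathlib
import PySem

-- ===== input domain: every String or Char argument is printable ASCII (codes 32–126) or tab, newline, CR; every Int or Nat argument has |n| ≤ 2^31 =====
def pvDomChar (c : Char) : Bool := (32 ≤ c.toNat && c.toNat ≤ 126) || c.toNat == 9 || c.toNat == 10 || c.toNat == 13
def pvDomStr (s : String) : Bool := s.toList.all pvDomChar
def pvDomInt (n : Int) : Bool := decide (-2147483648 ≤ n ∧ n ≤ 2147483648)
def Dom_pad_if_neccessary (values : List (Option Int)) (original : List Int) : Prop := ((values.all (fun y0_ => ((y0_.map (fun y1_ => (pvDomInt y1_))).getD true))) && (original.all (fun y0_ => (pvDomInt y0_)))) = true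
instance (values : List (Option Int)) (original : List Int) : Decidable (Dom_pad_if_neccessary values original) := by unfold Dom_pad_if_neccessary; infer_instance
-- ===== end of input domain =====

-- B: positional formulation — closed-form output length and one index comprehension,
-- replacing A's fused loop with number_seen/cleaned/padding accumulators (objective: alternative).

-- ===== PORT A =====
-- `element or EMPTY` on Option Int: none -> 0, some n -> (n if n != 0 else 0)
def pvOrEmpty (e : Option Int) : Int :=
  match e with
  | none => 0
  | some n => if n = 0 then 0 else n

def pad_if_neccessary (values : List (Option Int)) (original : List Int) : List Int :=
  let st := values.foldl (fun (st : Bool × List Int × List Int) element =>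
    let number_seen := st.1
    let cleaned_values := st.2.1
    let padding := st.2.2
    let padding := if element = none then (if number_seen = false then padding ++ [0] else padding) else padding
    let number_seen := if element = none then number_seen else true
    let cleaned_values := cleaned_values ++ [pvOrEmpty element]
    (number_seen, cleaned_values, padding)) (false, [], [])
  let cleaned_values := st.2.1 ++ st.2.2
  if cleaned_values.length < original.length then
    cleaned_values ++ List.replicate (original.length - cleaned_values.length) 0
  else cleaned_values

-- ===== PORT B =====
-- `next((i for i, v in enumerate(values) if v != PLACEHOLDER), len(values))` is
-- List.findIdx (which returns the length when no element matches, exactly Python's default).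
def pad_if_neccessary_alt (values : List (Option Int)) (original : List Int) : List Int :=
  let lead := values.findIdx (fun v => v ≠ none)
  let total := max (values.length + lead) original.length
  (List.range total).map (fun i =>
    if h : i < values.length then pvOrEmpty values[i] else 0)

-- ===== PRECONDITION & SPEC =====
def Spec_pad_if_neccessary (values : List (Option Int)) (original : List Int) (out : List Int) : Prop := out = pad_if_neccessary_alt values original
instance (values : List (Option Int)) (original : List Int) (out : List Int) : Decidable (Spec_pad_if_neccessary values original out) := by unfold Spec_pad_if_neccessary; infer_instance

-- ===== CLAIM (what is proved, stated in full; the proofs are below) =====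
def Claim_equal_pad_if_neccessary : Prop := ∀ (values : List (Option Int)) (original : List Int), Dom_pad_if_neccessary values original → Spec_pad_if_neccessary values original (pad_if_neccessary values original)

-- ===== LEMMAS AND PROOFS =====

-- the fold step of port A, named for the invariant lemmas
def pvStepA (st : Bool × List Int × List Int) (element : Option Int) : Bool × List Int × List Int :=
  let number_seen := st.1
  let cleaned_values := st.2.1
  let padding := st.2.2
  let padding := if element = none then (if number_seen = false then padding ++ [0] else padding) else padding
  let number_seen := if element = none then number_seen else true
  let cleaned_values := cleaned_values ++ [pvOrEmpty element]
  (number_seen, cleaned_values, padding)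

theorem pvFoldA_true (values : List (Option Int)) (c p : List Int) :
    values.foldl pvStepA (true, c, p) = (true, c ++ values.map pvOrEmpty, p) := by
  induction values generalizing c p with
  | nil => simp
  | cons e t ih =>
    simp only [List.foldl_cons, pvStepA, List.map_cons]
    cases e <;> simp [ih]

theorem pvFoldA_false (values : List (Option Int)) (c p : List Int) :
    values.foldl pvStepA (false, c, p) =
      (values.any (fun v => v ≠ none), c ++ values.map pvOrEmpty,
       p ++ List.replicate (values.takeWhile (fun v => v = none)).length 0) := by
  induction values generalizing c p with
  | nil => simp
  | cons e t ih =>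
    cases e with
    | none =>
      simp only [List.foldl_cons, pvStepA]
      simp [ih, List.replicate_succ, List.append_assoc]
    | some n =>
      simp only [List.foldl_cons, pvStepA]
      simp [pvFoldA_true, List.takeWhile]

theorem pvLead_le (values : List (Option Int)) :
    (values.takeWhile (fun v => v = none)).length ≤ values.length :=
  (List.takeWhile_sublist _).length_le

-- Python's first-match index equals the length of the all-placeholder prefix
theorem pvFindIdx_eq_takeWhile (values : List (Option Int)) :
    values.findIdx (fun v => v ≠ none) = (values.takeWhile (fun v => v = none)).length := by
  induction values with
  | nil => simp
  | cons e t ih =>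
    have hpred : (fun v : Option Int => !decide (v = none)) = (fun v => decide (v ≠ none)) := by
      funext v; simp
    cases e <;> simp [List.findIdx_cons, List.takeWhile, hpred, ih]

-- the positional comprehension equals "cleaned ++ zeros"
theorem pvRange_map_eq (values : List (Option Int)) (k : Nat) :
    (List.range (values.length + k)).map (fun i =>
      if h : i < values.length then pvOrEmpty values[i] else 0)
      = values.map pvOrEmpty ++ List.replicate k 0 := by
  rw [List.range_add, List.map_append, List.map_map]
  congr 1
  · apply List.ext_getElem
    · simp
    · intro i h1 h2
      simp only [List.getElem_map, List.getElem_range]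
      rw [dif_pos (by simpa using h2)]
  · rw [List.eq_replicate_iff]
    refine ⟨by simp, ?_⟩
    intro b hb
    simp only [List.mem_map, List.mem_range, Function.comp] at hb
    obtain ⟨i, _, hi⟩ := hb
    rw [dif_neg (by omega)] at hi
    omega

-- ===== VERDICT (by name: the statement is the Claim_ definition above) =====
theorem pad_if_neccessary_spec : Claim_equal_pad_if_neccessary := by
  intro values original _
  show _ = _
  unfold pad_if_neccessary pad_if_neccessary_alt
  rw [show (fun (st : Bool × List Int × List Int) element =>
    let number_seen := st.1
    let cleaned_values := st.2.1
    let padding := st.2.2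
    let padding := if element = none then (if number_seen = false then padding ++ [0] else padding) else padding
    let number_seen := if element = none then number_seen else true
    let cleaned_values := cleaned_values ++ [pvOrEmpty element]
    (number_seen, cleaned_values, padding)) = pvStepA from rfl]
  rw [pvFoldA_false]
  simp only [List.nil_append, pvFindIdx_eq_takeWhile]
  set lead := (values.takeWhile (fun v => v = none)).length with hlead
  have hle : lead ≤ values.length := pvLead_le values
  set n := values.length with hn
  set m := original.length with hm
  have hmap : (values.map pvOrEmpty).length = n := by simp [hn]
  rw [show max (values.length + lead) m = values.length + (max (values.length + lead) m - values.length) from by omega]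
  rw [pvRange_map_eq values (max (values.length + lead) m - values.length)]
  have hlen : (values.map pvOrEmpty ++ List.replicate lead 0).length = n + lead := by simp [hmap]
  by_cases h : (values.map pvOrEmpty ++ List.replicate lead 0).length < m
  · rw [if_pos h]
    rw [hlen] at h
    rw [List.append_assoc, ← List.replicate_add]
    congr 2
    simp only [hlen]
    omega
  · rw [if_neg h]
    rw [hlen] at h
    have : max (n + lead) m - n = lead := by omega
    rw [this]
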